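-- pv_equiv track=rewrite | github.com/dianachu0209/CMSC141 | 141 HWs/hw5.py | find_region_locations
-- ===== SOURCE A (Python) =====
-- def find_region_locations(image, loc, radius):
--     """
--     Given an image, a location, and a radius, produces a list of
--     locations in the specified radius.
--
--     Inputs:
--         image [list[tuple(int, int, int)]]: image with pixels
--         loc [tuple(int,int)]: location being checked
--         radius [int]: size of radius around a location
--
--     Returns [list[tuple(int, int)]]: all the locations of values that are
--         within the given radius at a given location
--     """
--     i, j = loc
--     in_neighborhood = []
--     for idx, row in enumerate(image):
--         for col, _ in enumerate(row):
--             if abs(idx - i) <= radius and abs(col - j) <= radius: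
--                 in_pixel = [idx, col]
--                 tup_pix = tuple(in_pixel)
--                 in_neighborhood.append(tup_pix)
--             in_pixel = []
--     return in_neighborhood
-- ===== SOURCE B (Python) =====
-- def find_region_locations(image, loc, radius):
--     i, j = loc
--     out = []
--     for idx in range(max(0, i - radius), min(len(image), i + radius + 1)):
--         row = image[idx]
--         for col in range(max(0, j - radius), min(len(row), j + radius + 1)):
--             out.append((idx, col))
--     return out
-- ===== Notes on version B (the rewrite author's own statement) =====
-- stated objective: alternative
-- what changed: B iterates only the clamped index window [i-radius, i+radius] x [j-radius, j+radius] instead of scanning every pixel of the whole image and testing it; intended as faster for radii small relative to the image (a timing run's confirmation varied across input families, so no unqualified speed claim).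
import Mathlib
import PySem

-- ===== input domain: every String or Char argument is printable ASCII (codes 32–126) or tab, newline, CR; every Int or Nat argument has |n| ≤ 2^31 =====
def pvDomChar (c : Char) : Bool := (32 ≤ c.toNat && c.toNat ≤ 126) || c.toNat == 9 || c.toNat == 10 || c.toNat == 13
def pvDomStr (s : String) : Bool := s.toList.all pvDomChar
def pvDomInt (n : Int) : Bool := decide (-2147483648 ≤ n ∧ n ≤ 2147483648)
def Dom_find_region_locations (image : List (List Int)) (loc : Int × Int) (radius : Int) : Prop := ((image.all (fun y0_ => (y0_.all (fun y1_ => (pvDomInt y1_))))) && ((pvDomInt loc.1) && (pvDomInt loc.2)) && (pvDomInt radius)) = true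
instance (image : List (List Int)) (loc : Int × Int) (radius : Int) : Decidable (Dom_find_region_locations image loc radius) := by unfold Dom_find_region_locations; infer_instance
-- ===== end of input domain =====

-- B iterates only the clamped index window i±radius × j±radius instead of scanning every pixel of the image (objective: alternative).

-- ===== PORT A =====
def find_region_locations (image : List (List Int)) (loc : Int × Int) (radius : Int) : List (Int × Int) :=
  let i := loc.1
  let j := loc.2
  (PySem.List.enumerate image).foldl (fun in_neighborhood p =>
    (PySem.List.enumerate p.2).foldl (fun acc c =>
      if |p.1 - i| ≤ radius ∧ |c.1 - j| ≤ radius then acc ++ [(p.1, c.1)] else acc)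
      in_neighborhood) []

-- ===== PORT B =====
def find_region_locations_alt (image : List (List Int)) (loc : Int × Int) (radius : Int) : List (Int × Int) :=
  let i := loc.1
  let j := loc.2
  (PySem.List.pyRange (max 0 (i - radius)) (min (image.length : Int) (i + radius + 1)) 1).foldl
    (fun out idx =>
      let row := PySem.List.pyGetD image idx []
      (PySem.List.pyRange (max 0 (j - radius)) (min (row.length : Int) (j + radius + 1)) 1).foldl
        (fun acc col => acc ++ [(idx, col)]) out) []

-- ===== PRECONDITION & SPEC =====
def Spec_find_region_locations (image : List (List Int)) (loc : Int × Int) (radius : Int) (out : List (Int × Int)) : Prop := out = find_region_locations_alt image loc radius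
instance (image : List (List Int)) (loc : Int × Int) (radius : Int) (out : List (Int × Int)) : Decidable (Spec_find_region_locations image loc radius out) := by unfold Spec_find_region_locations; infer_instance

-- ===== CLAIM (what is proved, stated in full; the proofs are below) =====
def Claim_equal_find_region_locations : Prop := ∀ (image : List (List Int)) (loc : Int × Int) (radius : Int), Dom_find_region_locations image loc radius → Spec_find_region_locations image loc radius (find_region_locations image loc radius)

-- ===== LEMMAS AND PROOFS =====

-- flatMap of an if-else-[] body is flatMap over the filtered list
lemma flatMap_if_eq_filter {β : Type} (l : List Int) (p : Int → Bool) (h : Int → List β) :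
    l.flatMap (fun x => if p x then h x else []) = (l.filter p).flatMap h := by
  induction l with
  | nil => simp
  | cons a t ih =>
      by_cases hp : p a <;> simp [hp, ih]

-- filtering a range by an interval is the clamped range
lemma filter_pyRange_interval (L lo hi : Int) :
    (PySem.List.pyRange 0 L 1).filter (fun x => decide (lo ≤ x ∧ x < hi))
      = PySem.List.pyRange (max 0 lo) (min L hi) 1 := by
  have hs1 : ((PySem.List.pyRange 0 L 1).filter (fun x => decide (lo ≤ x ∧ x < hi))).Pairwise (· < ·) :=
    List.Pairwise.sublist List.filter_sublist (PySem.List.pairwise_lt_pyRange_one 0 L)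
  have hs2 : (PySem.List.pyRange (max 0 lo) (min L hi) 1).Pairwise (· < ·) :=
    PySem.List.pairwise_lt_pyRange_one _ _
  have hn1 := hs1.imp (fun h => ne_of_lt h)
  have hn2 := hs2.imp (fun h => ne_of_lt h)
  have hperm : ((PySem.List.pyRange 0 L 1).filter (fun x => decide (lo ≤ x ∧ x < hi))).Perm
      (PySem.List.pyRange (max 0 lo) (min L hi) 1) := by
    rw [List.perm_ext_iff_of_nodup hn1 hn2]
    intro a
    simp [List.mem_filter, PySem.List.mem_pyRange_one]
    omega
  exact List.Perm.eq_of_pairwise' (hs1.imp le_of_lt) (hs2.imp le_of_lt) hperm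

-- one row of A, when the row index is inside the vertical band
lemma inner_row_eq (idx i j radius : Int) (row : List Int) (hA : |idx - i| ≤ radius) :
    ((PySem.List.enumerate row).filter
        (fun c => decide (|idx - i| ≤ radius ∧ |c.1 - j| ≤ radius))).map (fun c => (idx, c.1))
      = (PySem.List.pyRange (max 0 (j - radius)) (min (row.length : Int) (j + radius + 1)) 1).map
          (fun col => (idx, col)) := by
  rw [PySem.List.enumerate_eq_map_pyRange (d := 0)]
  rw [List.filter_map, List.map_map]
  simp only [Function.comp_def]
  rw [abs_le] at hA
  have hcong : ∀ x ∈ PySem.List.pyRange 0 (PySem.List.len row) 1,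
      decide (|idx - i| ≤ radius ∧ |x - j| ≤ radius)
        = decide ((j - radius) ≤ x ∧ x < (j + radius + 1)) := by
    intro x _
    simp only [decide_eq_decide, abs_le]
    omega
  rw [List.filter_congr hcong]
  rw [PySem.List.len_eq, filter_pyRange_interval]

theorem find_region_locations_eq_alt (image : List (List Int)) (loc : Int × Int) (radius : Int) :
    find_region_locations image loc radius = find_region_locations_alt image loc radius := by
  obtain ⟨i, j⟩ := loc
  -- reduce A to a flatMap over row indices
  unfold find_region_locations find_region_locations_alt
  simp only
  have hA : (PySem.List.enumerate image).foldl (fun in_neighborhood p =>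
      (PySem.List.enumerate p.2).foldl (fun acc c =>
        if |p.1 - i| ≤ radius ∧ |c.1 - j| ≤ radius then acc ++ [(p.1, c.1)] else acc)
        in_neighborhood) ([] : List (Int × Int))
      = (PySem.List.enumerate image).flatMap (fun p =>
          ((PySem.List.enumerate p.2).filter
            (fun c => decide (|p.1 - i| ≤ radius ∧ |c.1 - j| ≤ radius))).map (fun c => (p.1, c.1))) := by
    have : ∀ (acc : List (Int × Int)), (PySem.List.enumerate image).foldl (fun in_neighborhood p =>
        (PySem.List.enumerate p.2).foldl (fun acc c =>
          if |p.1 - i| ≤ radius ∧ |c.1 - j| ≤ radius then acc ++ [(p.1, c.1)] else acc)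
          in_neighborhood) acc
        = acc ++ (PySem.List.enumerate image).flatMap (fun p =>
            ((PySem.List.enumerate p.2).filter
              (fun c => decide (|p.1 - i| ≤ radius ∧ |c.1 - j| ≤ radius))).map (fun c => (p.1, c.1))) := by
      intro acc
      rw [← PySem.List.foldl_append_eq_flatMap]
      apply PySem.List.foldl_congr_mem
      intro acc' p _
      exact PySem.List.foldl_append_ite _ _ _ _
    simpa using this []
  rw [hA]
  -- reduce B to a flatMap over the clamped row range
  have hB : (PySem.List.pyRange (max 0 (i - radius)) (min (image.length : Int) (i + radius + 1)) 1).foldl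
      (fun out idx =>
        (PySem.List.pyRange (max 0 (j - radius))
            (min ((PySem.List.pyGetD image idx []).length : Int) (j + radius + 1)) 1).foldl
          (fun acc col => acc ++ [(idx, col)]) out) ([] : List (Int × Int))
      = (PySem.List.pyRange (max 0 (i - radius)) (min (image.length : Int) (i + radius + 1)) 1).flatMap
          (fun idx => (PySem.List.pyRange (max 0 (j - radius))
              (min ((PySem.List.pyGetD image idx []).length : Int) (j + radius + 1)) 1).map
            (fun col => (idx, col))) := by
    have : ∀ (acc : List (Int × Int)),
        (PySem.List.pyRange (max 0 (i - radius)) (min (image.length : Int) (i + radius + 1)) 1).foldl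
          (fun out idx =>
            (PySem.List.pyRange (max 0 (j - radius))
                (min ((PySem.List.pyGetD image idx []).length : Int) (j + radius + 1)) 1).foldl
              (fun acc col => acc ++ [(idx, col)]) out) acc
          = acc ++ (PySem.List.pyRange (max 0 (i - radius)) (min (image.length : Int) (i + radius + 1)) 1).flatMap
              (fun idx => (PySem.List.pyRange (max 0 (j - radius))
                  (min ((PySem.List.pyGetD image idx []).length : Int) (j + radius + 1)) 1).map
                (fun col => (idx, col))) := by
      intro acc
      rw [← PySem.List.foldl_append_eq_flatMap]
      apply PySem.List.foldl_congr_mem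
      intro acc' idx _
      exact PySem.List.foldl_append_singleton_eq_map _ _ _
    simpa using this []
  rw [hB]
  -- A: enumerate image = map over pyRange 0 len
  rw [PySem.List.enumerate_eq_map_pyRange (d := ([] : List Int)), List.flatMap_map]
  -- pointwise: body = if-in-band then row-window else []
  have hbody : ∀ x ∈ PySem.List.pyRange 0 (PySem.List.len image) 1,
      (((PySem.List.enumerate (PySem.List.pyGetD image x [])).filter
          (fun c => decide (|x - i| ≤ radius ∧ |c.1 - j| ≤ radius))).map (fun c => (x, c.1)))
        = (fun idx => if decide ((i - radius) ≤ idx ∧ idx < (i + radius + 1)) then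
            (PySem.List.pyRange (max 0 (j - radius))
                (min ((PySem.List.pyGetD image idx []).length : Int) (j + radius + 1)) 1).map
              (fun col => (idx, col)) else []) x := by
    intro x _
    by_cases hband : |x - i| ≤ radius
    · rw [inner_row_eq x i j radius _ hband]
      rw [abs_le] at hband
      have hc : (i - radius) ≤ x ∧ x < (i + radius + 1) := by omega
      simp [hc.1, hc.2]
    · rw [List.filter_eq_nil_iff.mpr (by intro c hc; simp [hband])]
      rw [abs_le] at hband
      have hc : ¬ ((i - radius) ≤ x ∧ x < (i + radius + 1)) := by omega
      simp
      intro h1 h2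
      exact absurd ⟨by omega, by omega⟩ hc
  rw [List.flatMap_congr hbody]
  rw [flatMap_if_eq_filter]
  rw [PySem.List.len_eq, filter_pyRange_interval]

-- ===== VERDICT (by name: the statement is the Claim_ definition above) =====
theorem find_region_locations_spec : Claim_equal_find_region_locations := by
  intro image loc radius _
  exact find_region_locations_eq_alt image loc radius
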